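-- pv_equiv track=rewrite | github.com/SherzodOtajonov/cp-stuff | codeforces/2020/problemset/Lucky_Division.py | solve
-- ===== SOURCE A (Python) =====
-- def solve(n):
-- 	lucky1 = [4, 7]
-- 	lucky2 = set('47')
-- 	if set(str(n)) == lucky2 or n in lucky1: return 'YES'
-- 	for i in range(n):
-- 		if (i in lucky1 or set(str(i)) == lucky2) and n%i == 0:
-- 			return 'YES'
-- 	return 'NO'
-- ===== SOURCE B (Python) =====
-- def solve(n):
--     # DFS over lucky numbers (digits 4/7) up to n, testing divisibility.
--     def divides(m):
--         if m > n:
--             return False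
--         return n % m == 0 or divides(10 * m + 4) or divides(10 * m + 7)
--     return 'YES' if divides(4) or divides(7) else 'NO'
-- ===== Notes on version B (the rewrite author's own statement) =====
-- stated objective: faster
-- what changed: Instead of scanning every i in range(n) and testing its digit set, B enumerates only the lucky numbers (digits 4/7) up to n by recursive generation (m -> 10m+4, 10m+7) and tests divisibility.
import Mathlib
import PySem

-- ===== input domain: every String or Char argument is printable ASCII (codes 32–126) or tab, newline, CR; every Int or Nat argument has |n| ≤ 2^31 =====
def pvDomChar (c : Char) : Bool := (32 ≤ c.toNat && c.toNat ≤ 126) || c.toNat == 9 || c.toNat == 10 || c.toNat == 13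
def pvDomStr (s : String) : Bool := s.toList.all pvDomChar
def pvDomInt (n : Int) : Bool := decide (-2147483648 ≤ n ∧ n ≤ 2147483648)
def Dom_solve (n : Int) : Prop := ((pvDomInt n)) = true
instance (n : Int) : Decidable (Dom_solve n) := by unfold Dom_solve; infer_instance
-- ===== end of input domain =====

-- B replaces A's O(n) scan over range(n) with a recursive enumeration of the lucky numbers (digits 4/7) up to n, tested for divisibility: measurably faster.

-- ===== PORT A =====
def solve (n : Int) : String :=
  let lucky1 : List Int := [4, 7]
  let lucky2 : PySem.Set Char := PySem.Set.ofList "47".toList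
  if PySem.Set.equal (PySem.Set.ofList (PySem.Int.toChars n)) lucky2 || lucky1.contains n then "YES"
  else
    match (PySem.List.pyRange 0 n 1).find? (fun i =>
        (lucky1.contains i || PySem.Set.equal (PySem.Set.ofList (PySem.Int.toChars i)) lucky2)
          && (PySem.Int.mod n i == 0)) with
    | some _ => "YES"
    | none => "NO"

-- ===== PORT B =====
def pvDivides (n : Int) (m : Nat) : Bool :=
  if n < (m : Int) then false
  else (PySem.Int.mod n (m : Int) == 0) || pvDivides n (10 * m + 4) || pvDivides n (10 * m + 7)
termination_by n.toNat + 1 - m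
decreasing_by all_goals (simp at *; omega)

def solve_alt (n : Int) : String :=
  if pvDivides n 4 || pvDivides n 7 then "YES" else "NO"

-- ===== PRECONDITION & SPEC =====
def Spec_solve (n : Int) (out : String) : Prop := out = solve_alt n
instance (n : Int) (out : String) : Decidable (Spec_solve n out) := by unfold Spec_solve; infer_instance

-- ===== CLAIM (what is proved, stated in full; the proofs are below) =====
def Claim_equal_solve : Prop := ∀ (n : Int), Dom_solve n → Spec_solve n (solve n)

-- ===== LEMMAS AND PROOFS =====

-- General facts about Nat.toDigits 10 (no Mathlib lemma exists for these):
theorem tdc_acc (fuel : Nat) : ∀ (n : Nat) (ds : List Char),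
    Nat.toDigitsCore 10 fuel n ds = Nat.toDigitsCore 10 fuel n [] ++ ds := by
  induction fuel with
  | zero => intro n ds; simp [Nat.toDigitsCore]
  | succ f ih =>
    intro n ds
    simp only [Nat.toDigitsCore]
    by_cases h : n / 10 = 0
    · simp [h]
    · simp only [h, if_false]
      rw [ih (n/10) (_ :: ds), ih (n/10) [_]]
      simp

theorem tdc_fuel : ∀ (n f g : Nat), n < f → n < g → ∀ ds,
    Nat.toDigitsCore 10 f n ds = Nat.toDigitsCore 10 g n ds := by
  intro n
  induction n using Nat.strong_induction_on with
  | _ n ih =>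
    intro f g hf hg ds
    match f, g with
    | f+1, g+1 =>
      simp only [Nat.toDigitsCore]
      by_cases h : n / 10 = 0
      · simp [h]
      · simp only [h, if_false]
        exact ih (n/10) (Nat.div_lt_self (by omega) (by omega)) f g (by omega) (by omega) _

theorem toDigits10_step (m d : Nat) (hm : 0 < m) (hd : d < 10) :
    Nat.toDigits 10 (10*m+d) = Nat.toDigits 10 m ++ [Nat.digitChar d] := by
  have h1 : (10*m+d) / 10 = m := by omega
  have h2 : (10*m+d) % 10 = d := by omega
  have step : ∀ (f n : Nat) (ds : List Char), Nat.toDigitsCore 10 (f+1) n ds =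
      if n / 10 = 0 then (n % 10).digitChar :: ds
      else Nat.toDigitsCore 10 f (n / 10) ((n % 10).digitChar :: ds) := fun _ _ _ => rfl
  show Nat.toDigitsCore 10 (10*m+d+1) (10*m+d) [] = _
  rw [step, h1, h2, if_neg (by omega), tdc_acc,
      tdc_fuel m (10*m+d) (m+1) (by omega) (by omega)]
  rfl

theorem toDigits10_lt (d : Nat) (hd : d < 10) : Nat.toDigits 10 d = [Nat.digitChar d] := by
  simp [Nat.toDigits, Nat.toDigitsCore, Nat.div_eq_of_lt hd, Nat.mod_eq_of_lt hd]

theorem toDigits10_ne_nil (n : Nat) : Nat.toDigits 10 n ≠ [] := by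
  rcases Nat.lt_or_ge n 10 with h | h
  · rw [toDigits10_lt n h]; simp
  · have : n = 10 * (n/10) + n % 10 := by omega
    rw [this, toDigits10_step _ _ (by omega) (by omega)]
    simp

inductive Lk : Nat → Prop
  | four : Lk 4
  | seven : Lk 7
  | a4 {m : Nat} : Lk m → Lk (10*m+4)
  | a7 {m : Nat} : Lk m → Lk (10*m+7)

theorem Lk.ge4 {k : Nat} (h : Lk k) : 4 ≤ k := by
  induction h <;> omega

theorem digitChar47 (d : Nat) (hd : d < 10) :
    (Nat.digitChar d = '4' ∨ Nat.digitChar d = '7') ↔ (d = 4 ∨ d = 7) := by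
  interval_cases d <;> simp [Nat.digitChar]

theorem luckyOf (k : Nat) (hk : 0 < k)
    (h : ∀ c ∈ Nat.toDigits 10 k, c = '4' ∨ c = '7') : Lk k := by
  induction k using Nat.strong_induction_on with
  | _ k ih =>
    rcases Nat.lt_or_ge k 10 with hlt | hge
    · rw [toDigits10_lt k hlt] at h
      have := (digitChar47 k hlt).mp (h _ (by simp))
      rcases this with h4 | h7
      · subst h4; exact Lk.four
      · subst h7; exact Lk.seven
    · have hk10 : k = 10 * (k/10) + k % 10 := by omega
      rw [hk10, toDigits10_step _ _ (by omega) (by omega)] at h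
      have hdig : k % 10 = 4 ∨ k % 10 = 7 :=
        (digitChar47 _ (by omega)).mp (h _ (by simp))
      have hrest : ∀ c ∈ Nat.toDigits 10 (k/10), c = '4' ∨ c = '7' := by
        intro c hc; exact h c (by simp [hc])
      have hLk : Lk (k/10) := ih (k/10) (by omega) (by omega) hrest
      rw [hk10]
      rcases hdig with h4 | h7
      · rw [h4]; exact Lk.a4 hLk
      · rw [h7]; exact Lk.a7 hLk

theorem Lk.tri {k : Nat} (h : Lk k) :
    ((∀ c ∈ Nat.toDigits 10 k, c = '4') ∧ 4 ∣ k) ∨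
    ((∀ c ∈ Nat.toDigits 10 k, c = '7') ∧ 7 ∣ k) ∨
    ('4' ∈ Nat.toDigits 10 k ∧ '7' ∈ Nat.toDigits 10 k ∧
      ∀ c ∈ Nat.toDigits 10 k, c = '4' ∨ c = '7') := by
  induction h with
  | four => left; constructor
            · rw [toDigits10_lt 4 (by omega)]; intro c hc; simpa [Nat.digitChar] using hc
            · omega
  | seven => right; left; constructor
             · rw [toDigits10_lt 7 (by omega)]; intro c hc; simpa [Nat.digitChar] using hc
             · omega
  | @a4 m hm ih =>
    have hpos : 0 < m := by have := hm.ge4; omega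
    rw [toDigits10_step m 4 hpos (by omega)]
    have hne := toDigits10_ne_nil m
    have h4c : Nat.digitChar 4 = '4' := rfl
    rcases ih with ⟨hall, hdvd⟩ | ⟨hall, hdvd⟩ | ⟨h4, h7, hall⟩
    · left; constructor
      · intro c hc; simp [h4c] at hc; rcases hc with hc | hc; exact hall c hc; exact hc
      · omega
    · right; right
      refine ⟨by simp [h4c], ?_, ?_⟩
      · rcases List.exists_mem_of_ne_nil _ hne with ⟨c, hc⟩
        have := hall c hc; subst this; simp [hc]
      · intro c hc; simp [h4c] at hc
        rcases hc with hc | hc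
        · exact Or.inr (hall c hc)
        · exact Or.inl hc
    · right; right
      refine ⟨by simp [h4c], by simp [h7], ?_⟩
      intro c hc; simp [h4c] at hc
      rcases hc with hc | hc
      · exact hall c hc
      · exact Or.inl hc
  | @a7 m hm ih =>
    have hpos : 0 < m := by have := hm.ge4; omega
    rw [toDigits10_step m 7 hpos (by omega)]
    have hne := toDigits10_ne_nil m
    have h7c : Nat.digitChar 7 = '7' := rfl
    rcases ih with ⟨hall, hdvd⟩ | ⟨hall, hdvd⟩ | ⟨h4, h7, hall⟩
    · right; right
      refine ⟨?_, by simp [h7c], ?_⟩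
      · rcases List.exists_mem_of_ne_nil _ hne with ⟨c, hc⟩
        have := hall c hc; subst this; simp [hc]
      · intro c hc; simp [h7c] at hc
        rcases hc with hc | hc
        · exact Or.inl (hall c hc)
        · exact Or.inr hc
    · right; left; constructor
      · intro c hc; simp [h7c] at hc; rcases hc with hc | hc; exact hall c hc; exact hc
      · omega
    · right; right
      refine ⟨by simp [h4], by simp [h7c], ?_⟩
      intro c hc; simp [h7c] at hc
      rcases hc with hc | hc
      · exact hall c hc
      · exact Or.inr hc

inductive LExt : Nat → Nat → Prop
  | refl (m : Nat) : LExt m m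
  | a4 {m k : Nat} : LExt (10*m+4) k → LExt m k
  | a7 {m k : Nat} : LExt (10*m+7) k → LExt m k

theorem LExt.le {m k : Nat} (h : LExt m k) : m ≤ k := by
  induction h <;> omega

theorem pvDivides_iff (n : Int) (m : Nat) :
    pvDivides n m = true ↔ ∃ k, LExt m k ∧ (k:Int) ≤ n ∧ PySem.Int.mod n (k:Int) = 0 := by
  constructor
  · intro h
    fun_induction pvDivides n m with
    | case1 m hlt => simp at h
    | case2 m hlt ih1 ih2 =>
      rcases Bool.or_eq_true_iff.mp h with h' | h'
      · rcases Bool.or_eq_true_iff.mp h' with h'' | h''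
        · exact ⟨m, LExt.refl m, by omega, by simpa using h''⟩
        · rcases ih1 h'' with ⟨k, hext, hk, hmod⟩
          exact ⟨k, LExt.a4 hext, hk, hmod⟩
      · rcases ih2 h' with ⟨k, hext, hk, hmod⟩
        exact ⟨k, LExt.a7 hext, hk, hmod⟩
  · rintro ⟨k, hext, hk, hmod⟩
    induction hext with
    | refl m =>
      rw [pvDivides, if_neg (by omega)]
      simp [hmod]
    | @a4 m k h ih =>
      have : (10*m+4 : Nat) ≤ k := h.le
      rw [pvDivides, if_neg (by omega)]
      simp [ih hk hmod]
    | @a7 m k h ih =>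
      have : (10*m+7 : Nat) ≤ k := h.le
      rw [pvDivides, if_neg (by omega)]
      simp [ih hk hmod]

theorem LExt.snoc4 {s m : Nat} (h : LExt s m) : LExt s (10*m+4) := by
  induction h with
  | refl m => exact LExt.a4 (LExt.refl _)
  | a4 _ ih => exact LExt.a4 ih
  | a7 _ ih => exact LExt.a7 ih

theorem LExt.snoc7 {s m : Nat} (h : LExt s m) : LExt s (10*m+7) := by
  induction h with
  | refl m => exact LExt.a7 (LExt.refl _)
  | a4 _ ih => exact LExt.a4 ih
  | a7 _ ih => exact LExt.a7 ih

theorem Lk_of_LExt {m k : Nat} (hm : Lk m) (h : LExt m k) : Lk k := by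
  induction h with
  | refl => exact hm
  | a4 h ih => exact ih (Lk.a4 hm)
  | a7 h ih => exact ih (Lk.a7 hm)

theorem Lk_iff_LExt (k : Nat) : Lk k ↔ LExt 4 k ∨ LExt 7 k := by
  constructor
  · intro h
    induction h with
    | four => exact Or.inl (LExt.refl 4)
    | seven => exact Or.inr (LExt.refl 7)
    | a4 _ ih => rcases ih with h | h
                 · exact Or.inl h.snoc4
                 · exact Or.inr h.snoc4
    | a7 _ ih => rcases ih with h | h
                 · exact Or.inl h.snoc7
                 · exact Or.inr h.snoc7
  · rintro (h | h)
    · exact Lk_of_LExt Lk.four h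
    · exact Lk_of_LExt Lk.seven h

theorem solve_alt_yes_iff (n : Int) :
    solve_alt n = "YES" ↔ ∃ k, Lk k ∧ (k:Int) ≤ n ∧ PySem.Int.mod n (k:Int) = 0 := by
  have key : (pvDivides n 4 || pvDivides n 7) = true ↔
      ∃ k, Lk k ∧ (k:Int) ≤ n ∧ PySem.Int.mod n (k:Int) = 0 := by
    rw [Bool.or_eq_true_iff]
    constructor
    · rintro (h' | h')
      · rcases (pvDivides_iff n 4).mp h' with ⟨k, he, hk, hm⟩
        exact ⟨k, (Lk_iff_LExt k).mpr (Or.inl he), hk, hm⟩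
      · rcases (pvDivides_iff n 7).mp h' with ⟨k, he, hk, hm⟩
        exact ⟨k, (Lk_iff_LExt k).mpr (Or.inr he), hk, hm⟩
    · rintro ⟨k, hl, hk, hm⟩
      rcases (Lk_iff_LExt k).mp hl with he | he
      · exact Or.inl ((pvDivides_iff n 4).mpr ⟨k, he, hk, hm⟩)
      · exact Or.inr ((pvDivides_iff n 7).mpr ⟨k, he, hk, hm⟩)
  unfold solve_alt
  split_ifs with hb
  · exact iff_of_true rfl (key.mp hb)
  · exact iff_of_false (by decide) (fun hx => hb (key.mpr hx))

def pvLuckyB (i : Int) : Bool :=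
  PySem.Set.equal (PySem.Set.ofList (PySem.Int.toChars i)) (PySem.Set.ofList "47".toList)

theorem pvLuckyB_iff (i : Int) :
    pvLuckyB i = true ↔ ∀ c, c ∈ PySem.Int.toChars i ↔ (c = '4' ∨ c = '7') := by
  rw [pvLuckyB, PySem.Set.equal_iff]
  constructor
  · intro h c
    rw [← PySem.Set.mem_ofList (PySem.Int.toChars i) c, h c, PySem.Set.mem_ofList]
    simp
  · intro h c
    rw [PySem.Set.mem_ofList, PySem.Set.mem_ofList, h c]
    simp

theorem toChars_natCast (k : Nat) : PySem.Int.toChars (k : Int) = Nat.toDigits 10 k := by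
  simp [PySem.Int.toChars]

theorem cond_to_lucky (i : Int) (h : pvLuckyB i = true ∨ i = 4 ∨ i = 7) :
    ∃ k : Nat, (k:Int) = i ∧ Lk k := by
  rcases h with h | h | h
  · have hmem := (pvLuckyB_iff i).mp h
    have hnonneg : 0 ≤ i := by
      by_contra hneg
      have : PySem.Int.toChars i = '-' :: Nat.toDigits 10 i.natAbs := by
        simp [PySem.Int.toChars, show i < 0 by omega]
      have := (hmem '-').mp (by rw [this]; simp)
      simp at this
    have hichars : PySem.Int.toChars i = Nat.toDigits 10 i.toNat := by
      rw [show i = ((i.toNat : Nat) : Int) by omega, toChars_natCast, Int.toNat_natCast]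
    rw [hichars] at hmem
    have hpos : 0 < i.toNat := by
      rcases Nat.eq_zero_or_pos i.toNat with h0 | h0
      · exfalso
        have := (hmem '0').mp (by rw [h0, toDigits10_lt 0 (by omega)]; simp [Nat.digitChar])
        simp at this
      · exact h0
    exact ⟨i.toNat, by omega, luckyOf i.toNat hpos (fun c hc => (hmem c).mp hc)⟩
  · exact ⟨4, by omega, Lk.four⟩
  · exact ⟨7, by omega, Lk.seven⟩

theorem lucky_both_DSb (k : Nat) (h4 : '4' ∈ Nat.toDigits 10 k) (h7 : '7' ∈ Nat.toDigits 10 k)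
    (hall : ∀ c ∈ Nat.toDigits 10 k, c = '4' ∨ c = '7') : pvLuckyB (k : Int) = true := by
  rw [pvLuckyB_iff, toChars_natCast]
  intro c
  constructor
  · exact hall c
  · rintro (rfl | rfl) <;> assumption

theorem solve_yes_iff (n : Int) :
    solve n = "YES" ↔ ((pvLuckyB n = true ∨ n = 4 ∨ n = 7) ∨
      ∃ i, 0 ≤ i ∧ i < n ∧ (pvLuckyB i = true ∨ i = 4 ∨ i = 7) ∧ PySem.Int.mod n i = 0) := by
  unfold solve
  simp only []
  split_ifs with h1
  · refine iff_of_true rfl (Or.inl ?_)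
    rcases Bool.or_eq_true_iff.mp h1 with h | h
    · exact Or.inl h
    · right; simpa using h
  · rcases hf : (PySem.List.pyRange 0 n 1).find? (fun i =>
        ([4, 7].contains i || PySem.Set.equal (PySem.Set.ofList (PySem.Int.toChars i))
          (PySem.Set.ofList "47".toList)) && (PySem.Int.mod n i == 0)) with _ | x
    · refine iff_of_false (by decide) ?_
      rintro (hc | ⟨i, h0, hlt, hc, hm⟩)
      · apply h1
        rcases hc with hc | hc | hc
        · exact Bool.or_eq_true_iff.mpr (Or.inl hc)
        · subst hc; decide
        · subst hc; decide
      · have := List.find?_eq_none.mp hf i (by rw [PySem.List.mem_pyRange_one]; omega)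
        apply this
        rw [Bool.and_eq_true, Bool.or_eq_true_iff]
        refine ⟨?_, by simpa using hm⟩
        rcases hc with hc | hc | hc
        · exact Or.inr hc
        · subst hc; left; decide
        · subst hc; left; decide
    · refine iff_of_true rfl (Or.inr ?_)
      have hmem := List.mem_of_find?_eq_some hf
      have hp := List.find?_some hf
      rw [PySem.List.mem_pyRange_one] at hmem
      rw [Bool.and_eq_true, Bool.or_eq_true_iff] at hp
      refine ⟨x, hmem.1, hmem.2, ?_, by simpa using hp.2⟩
      rcases hp.1 with hc | hc
      · simp at hc
        rcases hc with hc | hc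
        · exact Or.inr (Or.inl hc)
        · exact Or.inr (Or.inr hc)
      · exact Or.inl hc

theorem solve_shape (n : Int) : solve n = "YES" ∨ solve n = "NO" := by
  unfold solve
  simp only []
  split_ifs
  · exact Or.inl rfl
  · rcases (PySem.List.pyRange 0 n 1).find? _ with _ | x
    · exact Or.inr rfl
    · exact Or.inl rfl

theorem solve_alt_shape (n : Int) : solve_alt n = "YES" ∨ solve_alt n = "NO" := by
  unfold solve_alt
  split_ifs
  · exact Or.inl rfl
  · exact Or.inr rfl

theorem main_iff (n : Int) : solve n = "YES" ↔ solve_alt n = "YES" := by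
  rw [solve_yes_iff, solve_alt_yes_iff]
  constructor
  · rintro (hc | ⟨i, h0, hlt, hc, hm⟩)
    · rcases cond_to_lucky n hc with ⟨k, hk, hLk⟩
      refine ⟨k, hLk, le_of_eq hk, ?_⟩
      rw [hk, PySem.Int.mod_eq_zero_iff_dvd]
    · rcases cond_to_lucky i hc with ⟨k, hk, hLk⟩
      exact ⟨k, hLk, by omega, by rw [hk]; exact hm⟩
  · rintro ⟨k, hLk, hk, hm⟩
    have hk4 : 4 ≤ k := hLk.ge4
    have hdvd : (k:Int) ∣ n := (PySem.Int.mod_eq_zero_iff_dvd n (k:Int)).mp hm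
    rcases hLk.tri with ⟨_, hd⟩ | ⟨_, hd⟩ | ⟨h4, h7, hall⟩
    · have h4n : (4:Int) ∣ n := dvd_trans (by exact_mod_cast Int.natCast_dvd_natCast.mpr hd) hdvd
      by_cases h4eq : n = 4
      · exact Or.inl (Or.inr (Or.inl h4eq))
      · refine Or.inr ⟨4, by omega, by omega, Or.inr (Or.inl rfl), ?_⟩
        rw [PySem.Int.mod_eq_zero_iff_dvd]; exact h4n
    · have hk7 : 7 ≤ k := by
        rcases hd with ⟨c, hc⟩; omega
      have h7n : (7:Int) ∣ n := dvd_trans (by exact_mod_cast Int.natCast_dvd_natCast.mpr hd) hdvd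
      by_cases h7eq : n = 7
      · exact Or.inl (Or.inr (Or.inr h7eq))
      · refine Or.inr ⟨7, by omega, by omega, Or.inr (Or.inr rfl), ?_⟩
        rw [PySem.Int.mod_eq_zero_iff_dvd]; exact h7n
    · have hDS : pvLuckyB (k : Int) = true := lucky_both_DSb k h4 h7 hall
      by_cases hkeq : (k:Int) = n
      · rw [hkeq] at hDS
        exact Or.inl (Or.inl hDS)
      · exact Or.inr ⟨k, by omega, by omega, Or.inl hDS, hm⟩

theorem final (n : Int) : solve n = solve_alt n := by
  rcases solve_shape n with hA | hA <;> rcases solve_alt_shape n with hB | hB <;> rw [hA, hB]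
  · exfalso
    have := (main_iff n).mp hA
    rw [hB] at this; exact absurd this (by decide)
  · exfalso
    have := (main_iff n).mpr hB
    rw [hA] at this; exact absurd this (by decide)

-- ===== VERDICT (by name: the statement is the Claim_ definition above) =====
theorem solve_spec : Claim_equal_solve := by
  intro n _
  unfold Spec_solve
  exact final n
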